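-- pv_equiv track=rewrite | github.com/sarbeshtiwari/arc-agi-3 | environment_files/rd01/rd01.py | _tile_arrow
-- ===== SOURCE A (Python) =====
-- def _make_tile(color, size):
--     return [[color] * size for _ in range(size)]
--
-- def _tile_arrow(bg, arrow_c, size, dx, dy):
--     t = _make_tile(bg, size)
--     mid = size // 2
--     if size >= 3:
--         if dx == 1:
--             for i in range(size):
--                 t[mid][i] = arrow_c
--             if mid - 1 >= 0:
--                 t[mid - 1][size - 2] = arrow_c
--             if mid + 1 < size:
--                 t[mid + 1][size - 2] = arrow_c
--         elif dx == -1: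
--             for i in range(size):
--                 t[mid][i] = arrow_c
--             if mid - 1 >= 0:
--                 t[mid - 1][1] = arrow_c
--             if mid + 1 < size:
--                 t[mid + 1][1] = arrow_c
--         elif dy == 1:
--             for i in range(size):
--                 t[i][mid] = arrow_c
--             if mid - 1 >= 0:
--                 t[size - 2][mid - 1] = arrow_c
--             if mid + 1 < size:
--                 t[size - 2][mid + 1] = arrow_c
--         elif dy == -1:
--             for i in range(size):
--                 t[i][mid] = arrow_c
--             if mid - 1 >= 0:
--                 t[1][mid - 1] = arrow_c
--             if mid + 1 < size:
--                 t[1][mid + 1] = arrow_c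
--     return t
-- ===== SOURCE B (Python) =====
-- def _tile_arrow(bg, arrow_c, size, dx, dy):
--     mid = size // 2
--
--     def on_arrow(i, j):
--         if size < 3:
--             return False
--         if dx == 1:
--             return i == mid or (j == size - 2 and abs(i - mid) == 1)
--         if dx == -1:
--             return i == mid or (j == 1 and abs(i - mid) == 1)
--         if dy == 1:
--             return j == mid or (i == size - 2 and abs(j - mid) == 1)
--         if dy == -1:
--             return j == mid or (i == 1 and abs(j - mid) == 1)
--         return False
--
--     return [[arrow_c if on_arrow(i, j) else bg for j in range(size)]
--             for i in range(size)]
-- ===== Notes on version B (the rewrite author's own statement) =====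
-- stated objective: simpler
-- what changed: B computes each cell from a single per-cell predicate in one comprehension pass instead of allocating a grid and imperatively mutating a row/column plus arrowhead cells per direction branch.
import Mathlib
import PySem

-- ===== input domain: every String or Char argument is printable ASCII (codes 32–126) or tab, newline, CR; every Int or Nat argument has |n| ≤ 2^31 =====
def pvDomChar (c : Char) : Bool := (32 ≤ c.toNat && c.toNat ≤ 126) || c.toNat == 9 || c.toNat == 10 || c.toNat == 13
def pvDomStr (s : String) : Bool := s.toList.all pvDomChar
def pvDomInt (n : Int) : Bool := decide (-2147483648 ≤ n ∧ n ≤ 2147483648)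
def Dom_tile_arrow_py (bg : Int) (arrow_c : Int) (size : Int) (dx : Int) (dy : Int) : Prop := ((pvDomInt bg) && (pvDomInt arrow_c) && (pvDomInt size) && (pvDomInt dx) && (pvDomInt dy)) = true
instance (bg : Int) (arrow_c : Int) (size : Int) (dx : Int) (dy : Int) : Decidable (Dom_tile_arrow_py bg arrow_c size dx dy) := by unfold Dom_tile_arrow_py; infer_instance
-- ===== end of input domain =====

-- B builds the grid in one comprehension from a per-cell predicate instead of mutating a plain grid; objective: simpler.

-- ===== PORT A =====
-- [[color] * size for _ in range(size)]; [x]*n = replicate n.toNat (empty for n <= 0) -- exact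
def pvMakeTile (color : Int) (size : Int) : List (List Int) :=
  (PySem.List.pyRange 0 size 1).map (fun _ => List.replicate size.toNat color)

-- t[r][c] = v; exact here because every index A uses is nonnegative and in range
def pvSetCell (t : List (List Int)) (r c : Int) (v : Int) : List (List Int) :=
  t.set r.toNat ((t.getD r.toNat []).set c.toNat v)

def tile_arrow_py (bg : Int) (arrow_c : Int) (size : Int) (dx : Int) (dy : Int) : List (List Int) :=
  let t := pvMakeTile bg size
  let mid := PySem.Int.floordiv size 2
  if 3 ≤ size then
    if dx = 1 then
      let t := (PySem.List.pyRange 0 size 1).foldl (fun t i => pvSetCell t mid i arrow_c) t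
      let t := if 0 ≤ mid - 1 then pvSetCell t (mid - 1) (size - 2) arrow_c else t
      let t := if mid + 1 < size then pvSetCell t (mid + 1) (size - 2) arrow_c else t
      t
    else if dx = -1 then
      let t := (PySem.List.pyRange 0 size 1).foldl (fun t i => pvSetCell t mid i arrow_c) t
      let t := if 0 ≤ mid - 1 then pvSetCell t (mid - 1) 1 arrow_c else t
      let t := if mid + 1 < size then pvSetCell t (mid + 1) 1 arrow_c else t
      t
    else if dy = 1 then
      let t := (PySem.List.pyRange 0 size 1).foldl (fun t i => pvSetCell t i mid arrow_c) t
      let t := if 0 ≤ mid - 1 then pvSetCell t (size - 2) (mid - 1) arrow_c else t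
      let t := if mid + 1 < size then pvSetCell t (size - 2) (mid + 1) arrow_c else t
      t
    else if dy = -1 then
      let t := (PySem.List.pyRange 0 size 1).foldl (fun t i => pvSetCell t i mid arrow_c) t
      let t := if 0 ≤ mid - 1 then pvSetCell t 1 (mid - 1) arrow_c else t
      let t := if mid + 1 < size then pvSetCell t 1 (mid + 1) arrow_c else t
      t
    else t
  else t

-- ===== PORT B =====
def pvOnArrow (size dx dy mid i j : Int) : Bool :=
  if size < 3 then false
  else if dx = 1 then i == mid || (j == size - 2 && (i - mid).natAbs == 1)
  else if dx = -1 then i == mid || (j == 1 && (i - mid).natAbs == 1)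
  else if dy = 1 then j == mid || (i == size - 2 && (j - mid).natAbs == 1)
  else if dy = -1 then j == mid || (i == 1 && (j - mid).natAbs == 1)
  else false

def tile_arrow_py_alt (bg : Int) (arrow_c : Int) (size : Int) (dx : Int) (dy : Int) : List (List Int) :=
  let mid := PySem.Int.floordiv size 2
  (PySem.List.pyRange 0 size 1).map (fun i =>
    (PySem.List.pyRange 0 size 1).map (fun j =>
      if pvOnArrow size dx dy mid i j then arrow_c else bg))

-- ===== PRECONDITION & SPEC =====
def Spec_tile_arrow_py (bg : Int) (arrow_c : Int) (size : Int) (dx : Int) (dy : Int) (out : List (List Int)) : Prop := out = tile_arrow_py_alt bg arrow_c size dx dy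
instance (bg : Int) (arrow_c : Int) (size : Int) (dx : Int) (dy : Int) (out : List (List Int)) : Decidable (Spec_tile_arrow_py bg arrow_c size dx dy out) := by unfold Spec_tile_arrow_py; infer_instance

-- ===== CLAIM (what is proved, stated in full; the proofs are below) =====
def Claim_equal_tile_arrow_py : Prop := ∀ (bg : Int) (arrow_c : Int) (size : Int) (dx : Int) (dy : Int), Dom_tile_arrow_py bg arrow_c size dx dy → Spec_tile_arrow_py bg arrow_c size dx dy (tile_arrow_py bg arrow_c size dx dy)

-- ===== LEMMAS AND PROOFS =====

/-- An `n × n` grid whose `(i,j)` cell is `f i j`. Both ports are reduced to this form. -/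
def pvGrid (n : Nat) (f : Int → Int → Int) : List (List Int) :=
  (List.range n).map (fun (i : Nat) => (List.range n).map (fun (j : Nat) => f (i : Int) (j : Int)))

theorem pvGrid_congr (n : Nat) (f g : Int → Int → Int)
    (h : ∀ i j : Nat, i < n → j < n → f (i : Int) (j : Int) = g (i : Int) (j : Int)) :
    pvGrid n f = pvGrid n g := by
  unfold pvGrid
  refine List.map_congr_left (fun i hi => ?_)
  refine List.map_congr_left (fun j hj => ?_)
  exact h i j (List.mem_range.mp hi) (List.mem_range.mp hj)

theorem pvSet_map_range {α : Type} (n k : Nat) (g : Nat → α) (v : α) (_hk : k < n) :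
    ((List.range n).map g).set k v = (List.range n).map (fun j => if j = k then v else g j) := by
  apply List.ext_getElem
  · simp
  · intro i h1 h2
    simp only [List.length_map, List.length_range] at h2
    rw [List.getElem_set]
    simp only [List.getElem_map, List.getElem_range]
    split_ifs with h3 h4 h4 <;> first | rfl | omega

theorem pvSetCell_grid (n : Nat) (r c v : Int) (f : Int → Int → Int)
    (hr0 : 0 ≤ r) (hr : r < (n : Int)) (hc0 : 0 ≤ c) (hc : c < (n : Int)) :
    pvSetCell (pvGrid n f) r c v
      = pvGrid n (fun i j => if i = r ∧ j = c then v else f i j) := by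
  have hrn : r.toNat < n := by omega
  have hcn : c.toNat < n := by omega
  have hir : ((r.toNat : Int)) = r := Int.toNat_of_nonneg hr0
  have hget : (pvGrid n f).getD r.toNat [] = (List.range n).map (fun (j : Nat) => f r (j : Int)) := by
    unfold pvGrid
    rw [List.getD_eq_getElem _ _ (by simpa using hrn)]
    simp only [List.getElem_map, List.getElem_range, hir]
  unfold pvSetCell
  rw [hget, pvSet_map_range n c.toNat _ v hcn]
  unfold pvGrid
  rw [pvSet_map_range n r.toNat _ _ hrn]
  apply List.map_congr_left
  intro i hi
  by_cases h : i = r.toNat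
  · subst h
    rw [if_pos rfl]
    apply List.map_congr_left
    intro j hj
    by_cases hjc : j = c.toNat
    · subst hjc
      simp [hir, Int.toNat_of_nonneg hc0]
    · have hne : ¬ ((j : Int) = c) := by omega
      simp [hjc, hir, hne]
  · rw [if_neg h]
    apply List.map_congr_left
    intro j hj
    have hne : ¬ ((i : Int) = r) := by omega
    simp [hne]

theorem pvRowFold_aux (n m : Nat) (mid v : Int) (f : Int → Int → Int) (hm : m ≤ n)
    (hmid0 : 0 ≤ mid) (hmid : mid < (n : Int)) :
    (List.range m).foldl (fun t (k : Nat) => pvSetCell t mid (k : Int) v) (pvGrid n f)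
      = pvGrid n (fun i j => if i = mid ∧ j < (m : Int) then v else f i j) := by
  induction m with
  | zero =>
    simp only [List.range_zero, List.foldl_nil]
    apply pvGrid_congr
    intro i j hi hj
    simp
  | succ m ih =>
    rw [List.range_succ, List.foldl_append, ih (by omega), List.foldl_cons, List.foldl_nil,
      pvSetCell_grid n mid (m : Int) v _ hmid0 hmid (by omega) (by omega)]
    apply pvGrid_congr
    intro i j hi hj
    split_ifs <;> first | rfl | (exfalso; omega)

theorem pvColFold_aux (n m : Nat) (mid v : Int) (f : Int → Int → Int) (hm : m ≤ n)
    (hmid0 : 0 ≤ mid) (hmid : mid < (n : Int)) :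
    (List.range m).foldl (fun t (k : Nat) => pvSetCell t (k : Int) mid v) (pvGrid n f)
      = pvGrid n (fun i j => if i < (m : Int) ∧ j = mid then v else f i j) := by
  induction m with
  | zero =>
    simp only [List.range_zero, List.foldl_nil]
    apply pvGrid_congr
    intro i j hi hj
    simp
  | succ m ih =>
    rw [List.range_succ, List.foldl_append, ih (by omega), List.foldl_cons, List.foldl_nil,
      pvSetCell_grid n (m : Int) mid v _ (by omega) (by omega) hmid0 hmid]
    apply pvGrid_congr
    intro i j hi hj
    split_ifs <;> first | rfl | (exfalso; omega)

theorem pvMakeTile_eq (bg size : Int) :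
    pvMakeTile bg size = pvGrid size.toNat (fun _ _ => bg) := by
  unfold pvMakeTile pvGrid
  rw [PySem.List.pyRange_one]
  simp [Function.comp_def, List.map_const']

theorem pvFoldRange (size : Int) (g : List (List Int) → Int → List (List Int)) (init : List (List Int)) :
    (PySem.List.pyRange 0 size 1).foldl g init
      = (List.range size.toNat).foldl (fun t (k : Nat) => g t (k : Int)) init := by
  rw [PySem.List.pyRange_one, List.foldl_map]
  simp

theorem pvAlt_eq (bg arrow_c size dx dy : Int) :
    tile_arrow_py_alt bg arrow_c size dx dy
      = pvGrid size.toNat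
          (fun i j => if pvOnArrow size dx dy (PySem.Int.floordiv size 2) i j then arrow_c else bg) := by
  unfold tile_arrow_py_alt pvGrid
  rw [PySem.List.pyRange_one]
  simp [List.map_map, Function.comp_def]

theorem pvMid_bounds (size : Int) (h : 3 ≤ size) :
    1 ≤ PySem.Int.floordiv size 2 ∧ PySem.Int.floordiv size 2 + 1 < size := by
  have : PySem.Int.floordiv size 2 = size / 2 := by
    unfold PySem.Int.floordiv
    exact Int.fdiv_eq_ediv_of_nonneg _ (by omega)
  rw [this]
  omega

-- ===== VERDICT (by name: the statement is the Claim_ definition above) =====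
theorem tile_arrow_py_spec : Claim_equal_tile_arrow_py := by
  intro bg arrow_c size dx dy _
  unfold Spec_tile_arrow_py tile_arrow_py
  rw [pvAlt_eq, pvMakeTile_eq]
  set mid := PySem.Int.floordiv size 2 with hmiddef
  by_cases hs : 3 ≤ size
  · have hmid := pvMid_bounds size hs
    have hn : (size.toNat : Int) = size := by omega
    have hm0 : (0:Int) ≤ mid := by omega
    have hmn : mid < (size.toNat : Int) := by omega
    simp only [if_pos hs]
    by_cases hdx1 : dx = 1
    · simp only [if_pos hdx1]
      rw [pvFoldRange, pvRowFold_aux size.toNat size.toNat mid arrow_c _ le_rfl hm0 hmn,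
        if_pos (by omega : (0:Int) ≤ mid - 1),
        pvSetCell_grid size.toNat (mid - 1) (size - 2) arrow_c _ (by omega) (by omega) (by omega) (by omega),
        if_pos (by omega : mid + 1 < size),
        pvSetCell_grid size.toNat (mid + 1) (size - 2) arrow_c _ (by omega) (by omega) (by omega) (by omega)]
      apply pvGrid_congr
      intro i j hi hj
      have hi' : (i : Int) < size := by omega
      have hj' : (j : Int) < size := by omega
      simp only [pvOnArrow, if_neg (by omega : ¬ size < 3), if_pos hdx1]
      simp only [Bool.or_eq_true, Bool.and_eq_true, beq_iff_eq]; split_ifs <;> first | rfl | (exfalso; omega)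
    · simp only [if_neg hdx1]
      by_cases hdx2 : dx = -1
      · simp only [if_pos hdx2]
        rw [pvFoldRange, pvRowFold_aux size.toNat size.toNat mid arrow_c _ le_rfl hm0 hmn,
          if_pos (by omega : (0:Int) ≤ mid - 1),
          pvSetCell_grid size.toNat (mid - 1) 1 arrow_c _ (by omega) (by omega) (by omega) (by omega),
          if_pos (by omega : mid + 1 < size),
          pvSetCell_grid size.toNat (mid + 1) 1 arrow_c _ (by omega) (by omega) (by omega) (by omega)]
        apply pvGrid_congr
        intro i j hi hj
        have hi' : (i : Int) < size := by omega
        have hj' : (j : Int) < size := by omega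
        simp only [pvOnArrow, if_neg (by omega : ¬ size < 3), if_neg hdx1, if_pos hdx2]
        simp only [Bool.or_eq_true, Bool.and_eq_true, beq_iff_eq]; split_ifs <;> first | rfl | (exfalso; omega)
      · simp only [if_neg hdx2]
        by_cases hdy1 : dy = 1
        · simp only [if_pos hdy1]
          rw [pvFoldRange, pvColFold_aux size.toNat size.toNat mid arrow_c _ le_rfl hm0 hmn,
            if_pos (by omega : (0:Int) ≤ mid - 1),
            pvSetCell_grid size.toNat (size - 2) (mid - 1) arrow_c _ (by omega) (by omega) (by omega) (by omega),
            if_pos (by omega : mid + 1 < size),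
            pvSetCell_grid size.toNat (size - 2) (mid + 1) arrow_c _ (by omega) (by omega) (by omega) (by omega)]
          apply pvGrid_congr
          intro i j hi hj
          have hi' : (i : Int) < size := by omega
          have hj' : (j : Int) < size := by omega
          simp only [pvOnArrow, if_neg (by omega : ¬ size < 3), if_neg hdx1, if_neg hdx2, if_pos hdy1]
          simp only [Bool.or_eq_true, Bool.and_eq_true, beq_iff_eq]; split_ifs <;> first | rfl | (exfalso; omega)
        · simp only [if_neg hdy1]
          by_cases hdy2 : dy = -1
          · simp only [if_pos hdy2]
            rw [pvFoldRange, pvColFold_aux size.toNat size.toNat mid arrow_c _ le_rfl hm0 hmn,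
              if_pos (by omega : (0:Int) ≤ mid - 1),
              pvSetCell_grid size.toNat 1 (mid - 1) arrow_c _ (by omega) (by omega) (by omega) (by omega),
              if_pos (by omega : mid + 1 < size),
              pvSetCell_grid size.toNat 1 (mid + 1) arrow_c _ (by omega) (by omega) (by omega) (by omega)]
            apply pvGrid_congr
            intro i j hi hj
            have hi' : (i : Int) < size := by omega
            have hj' : (j : Int) < size := by omega
            simp only [pvOnArrow, if_neg (by omega : ¬ size < 3), if_neg hdx1, if_neg hdx2, if_neg hdy1, if_pos hdy2]
            simp only [Bool.or_eq_true, Bool.and_eq_true, beq_iff_eq]; split_ifs <;> first | rfl | (exfalso; omega)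
          · simp only [if_neg hdy2]
            apply pvGrid_congr
            intro i j hi hj
            simp [pvOnArrow, hdx1, hdx2, hdy1, hdy2]
  · simp only [if_neg hs]
    apply pvGrid_congr
    intro i j hi hj
    simp [pvOnArrow, (by omega : size < 3)]
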